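-- pv_equiv track=rewrite | github.com/jackfrost168/adventofcode | 2021/day22.py | part2
-- ===== SOURCE A (Python) =====
-- from collections import defaultdict
--
-- def part2(steps):
--     def isintersect(new_area, area):
--         p_x1, p_y1, p_z1 = max(new_area[0][0], area[0][0]), max(new_area[0][1], area[0][1]), max(new_area[0][2], area[0][2])
--         p_x2, p_y2, p_z2 = min(new_area[1][0], area[1][0]), min(new_area[1][1], area[1][1]), min(new_area[1][2], area[1][2])
--
--         if p_x1 > p_x2 or p_y1 > p_y2 or p_z1 > p_z2:
--             return False
--         else:
--             return True
--
--
--     def intersection(new_area, area):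
--         p_x1, p_y1, p_z1 = max(new_area[0][0], area[0][0]), max(new_area[0][1], area[0][1]), max(new_area[0][2], area[0][2])
--         p_x2, p_y2, p_z2 = min(new_area[1][0], area[1][0]), min(new_area[1][1], area[1][1]), min(new_area[1][2], area[1][2])
--
--         return ((p_x1, p_y1, p_z1), (p_x2, p_y2, p_z2))
--
--
--     def get_area(area):
--         res = 1
--         for i in range(3):
--             res *= (area[1][i] - area[0][i] + 1)
--         return res
--
--
--     areas = defaultdict(int)
--     for step in steps:
--         point1 = (step[1][0], step[2][0], step[3][0])
--         point2 = (step[1][1], step[2][1], step[3][1])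
--         new_area = (point1, point2)
--         updated_areas = defaultdict(int)
--         if step[0] == 'on':
--             updated_areas[new_area] += 1
--
--         for area, value in areas.items():
--             if isintersect(new_area, area):
--                 intersection_area = intersection(new_area, area)
--                 updated_areas[intersection_area] -= value
--
--         for key in updated_areas.keys():
--             if key in areas.keys():
--                 areas[key] += updated_areas[key]
--             else:
--                 areas[key] = updated_areas[key]
--
--     return sum(get_area(area) * value for area, value in areas.items())
-- ===== SOURCE B (Python) =====
-- def part2(steps):
--     # Reverse view: a unit cube is lit iff the LAST step whose cuboid contains it
--     # is an 'on' step.  So the answer is the sum, over the 'on' steps, of the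
--     # volume of their cuboid NOT covered by any later cuboid (on or off):
--     #   unc(b, no later cuboids)  = vol(b)
--     #   unc(b, c then rest)       = unc(b, rest) - unc(b & c, rest)   if b & c is nonempty,
--     #                               unc(b, rest)                      otherwise
--     # The recurrence is evaluated below with an explicit stack and a memo table
--     # keyed by (cuboid, suffix index): same values as the recursion,
--     # without deep Python recursion.
--     boxes = [(((x1, y1, z1), (x2, y2, z2)), flag == 'on')
--              for flag, (x1, x2), (y1, y2), (z1, z2) in steps]
--     n = len(boxes)
--     memo = {}
--
--     def first_hit(b, j):
--         # first k >= j with boxes[k] intersecting b; returns (k+1, intersection) or (n+1, None)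
--         (bx1, by1, bz1), (bx2, by2, bz2) = b
--         while j < n:
--             (c1, c2), _ = boxes[j]
--             p1 = (max(bx1, c1[0]), max(by1, c1[1]), max(bz1, c1[2]))
--             p2 = (min(bx2, c2[0]), min(by2, c2[1]), min(bz2, c2[2]))
--             j += 1
--             if p1[0] <= p2[0] and p1[1] <= p2[1] and p1[2] <= p2[2]:
--                 return j, (p1, p2)
--         return n + 1, None
--
--     def uncovered(b0, j0):
--         # volume of cuboid b0 not covered by any of boxes[j0:]
--         stack = [(b0, j0)]
--         while stack:
--             b, j = stack[-1]
--             if (b, j) in memo: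
--                 stack.pop()
--                 continue
--             k, c = first_hit(b, j)
--             if c is None:
--                 (p1, p2) = b
--                 memo[(b, j)] = (p2[0] - p1[0] + 1) * (p2[1] - p1[1] + 1) * (p2[2] - p1[2] + 1)
--                 stack.pop()
--             elif (b, k) in memo and (c, k) in memo:
--                 memo[(b, j)] = memo[(b, k)] - memo[(c, k)]
--                 stack.pop()
--             else:
--                 if (b, k) not in memo:
--                     stack.append((b, k))
--                 if (c, k) not in memo:
--                     stack.append((c, k))
--         return memo[(b0, j0)]
--
--     total = 0
--     for i, (b, on) in enumerate(boxes):
--         if on: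
--             total += uncovered(b, i + 1)
--     return total
-- ===== Notes on version B (the rewrite author's own statement) =====
-- stated objective: alternative
-- what changed: Replaces A's forward pass that maintains a defaultdict of signed cuboid coefficients (per-step intersection buffer, membership-tested merge-back, final volume*coefficient sum) with a reverse-direction divide-and-conquer: each 'on' step contributes the volume of its cuboid not covered by any later cuboid, via the recurrence unc(b, nothing)=vol(b) and unc(b, c then rest)=unc(b,rest)-unc(b&c,rest) when b&c is nonempty, evaluated with a memo table and an explicit stack; no collection of signed cuboids is ever built.
import Mathlib
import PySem

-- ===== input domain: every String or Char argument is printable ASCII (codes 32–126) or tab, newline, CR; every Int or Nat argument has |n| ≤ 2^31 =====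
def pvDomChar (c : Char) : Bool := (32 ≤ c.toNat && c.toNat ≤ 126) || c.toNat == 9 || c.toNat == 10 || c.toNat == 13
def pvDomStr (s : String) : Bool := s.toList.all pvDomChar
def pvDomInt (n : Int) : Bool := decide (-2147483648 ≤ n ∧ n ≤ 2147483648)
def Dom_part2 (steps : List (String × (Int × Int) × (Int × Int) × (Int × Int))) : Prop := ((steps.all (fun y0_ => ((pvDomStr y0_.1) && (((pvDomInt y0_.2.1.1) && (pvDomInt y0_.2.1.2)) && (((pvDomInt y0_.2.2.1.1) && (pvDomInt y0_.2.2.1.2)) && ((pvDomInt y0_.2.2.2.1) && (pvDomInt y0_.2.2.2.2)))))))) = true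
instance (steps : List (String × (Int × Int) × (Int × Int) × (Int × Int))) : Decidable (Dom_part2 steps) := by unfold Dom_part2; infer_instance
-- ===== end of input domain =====

-- B replaces A's forward signed-coefficient dictionary with a reverse-direction
-- divide-and-conquer: each 'on' cuboid contributes the volume of its region not
-- covered by any later cuboid (objective: alternative algorithm, not claimed faster).

abbrev PvPt := Int × Int × Int
abbrev PvCub := PvPt × PvPt

-- ===== PORT A =====
def pvComp (p : PvPt) (i : Nat) : Int := if i = 0 then p.1 else if i = 1 then p.2.1 else p.2.2

def pvIsintersect (na area : PvCub) : Bool :=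
  let px1 := max na.1.1 area.1.1
  let py1 := max na.1.2.1 area.1.2.1
  let pz1 := max na.1.2.2 area.1.2.2
  let px2 := min na.2.1 area.2.1
  let py2 := min na.2.2.1 area.2.2.1
  let pz2 := min na.2.2.2 area.2.2.2
  if px1 > px2 ∨ py1 > py2 ∨ pz1 > pz2 then false else true

def pvIntersection (na area : PvCub) : PvCub :=
  ((max na.1.1 area.1.1, max na.1.2.1 area.1.2.1, max na.1.2.2 area.1.2.2),
   (min na.2.1 area.2.1, min na.2.2.1 area.2.2.1, min na.2.2.2 area.2.2.2))

def pvGetArea (area : PvCub) : Int :=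
  (List.range 3).foldl (fun res i => res * (pvComp area.2 i - pvComp area.1 i + 1)) 1

def pvStepA (areas : PySem.Dict PvCub Int)
    (step : String × (Int × Int) × (Int × Int) × (Int × Int)) : PySem.Dict PvCub Int :=
  let point1 : PvPt := (step.2.1.1, step.2.2.1.1, step.2.2.2.1)
  let point2 : PvPt := (step.2.1.2, step.2.2.1.2, step.2.2.2.2)
  let newArea : PvCub := (point1, point2)
  let updated0 : PySem.Dict PvCub Int :=
    if step.1 == "on" then PySem.Dict.empty.modify newArea 0 (· + 1) else PySem.Dict.empty
  let updated := areas.items.foldl (fun u p =>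
    if pvIsintersect newArea p.1 then
      u.modify (pvIntersection newArea p.1) 0 (fun x => x - p.2)
    else u) updated0
  updated.keys.foldl (fun ar key =>
    if ar.contains key then ar.insert key (ar.getD key 0 + updated.getD key 0)
    else ar.insert key (updated.getD key 0)) areas

def part2 (steps : List (String × (Int × Int) × (Int × Int) × (Int × Int))) : Int :=
  ((steps.foldl pvStepA PySem.Dict.empty).items.map (fun p => pvGetArea p.1 * p.2)).sum

-- ===== PORT B =====
def pvVolB (b : PvCub) : Int :=
  (b.2.1 - b.1.1 + 1) * (b.2.2.1 - b.1.2.1 + 1) * (b.2.2.2 - b.1.2.2 + 1)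

def pvInterB (b c : PvCub) : PvCub :=
  ((max b.1.1 c.1.1, max b.1.2.1 c.1.2.1, max b.1.2.2 c.1.2.2),
   (min b.2.1 c.2.1, min b.2.2.1 c.2.2.1, min b.2.2.2 c.2.2.2))

def pvProperB (b : PvCub) : Bool :=
  decide (b.1.1 ≤ b.2.1 ∧ b.1.2.1 ≤ b.2.2.1 ∧ b.1.2.2 ≤ b.2.2.2)

-- Source B's `uncovered` recurrence (there evaluated with an explicit stack and a memo
-- table over suffix indices — the same values): volume of b not covered by `later`.
def pvUnc : List PvCub → PvCub → Int
  | [], b => pvVolB b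
  | c :: rest, b =>
      if pvProperB (pvInterB b c) then pvUnc rest b - pvUnc rest (pvInterB b c)
      else pvUnc rest b

def pvBoxB (s : String × (Int × Int) × (Int × Int) × (Int × Int)) : PvCub × Bool :=
  (((s.2.1.1, s.2.2.1.1, s.2.2.2.1), (s.2.1.2, s.2.2.1.2, s.2.2.2.2)), s.1 == "on")

def pvTotalB : List (PvCub × Bool) → Int
  | [] => 0
  | (b, on) :: rest => (if on then pvUnc (rest.map Prod.fst) b else 0) + pvTotalB rest

def part2_alt (steps : List (String × (Int × Int) × (Int × Int) × (Int × Int))) : Int :=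
  pvTotalB (steps.map pvBoxB)

-- ===== PRECONDITION & SPEC =====
def Spec_part2 (steps : List (String × (Int × Int) × (Int × Int) × (Int × Int))) (out : Int) : Prop := out = part2_alt steps
instance (steps : List (String × (Int × Int) × (Int × Int) × (Int × Int))) (out : Int) : Decidable (Spec_part2 steps out) := by unfold Spec_part2; infer_instance

-- ===== CLAIM (what is proved, stated in full; the proofs are below) =====
def Claim_equal_part2 : Prop := ∀ (steps : List (String × (Int × Int) × (Int × Int) × (Int × Int))), Dom_part2 steps → Spec_part2 steps (part2 steps)

-- ===== LEMMAS AND PROOFS =====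

-- the signed flat list of cuboids that A's dictionary aggregates (proof-side bridge)
def pvStepF (cubs : List (PvCub × Int))
    (step : String × (Int × Int) × (Int × Int) × (Int × Int)) : List (PvCub × Int) :=
  cubs ++ ((if step.1 == "on"
      then [((((step.2.1.1, step.2.2.1.1, step.2.2.2.1),
               (step.2.1.2, step.2.2.1.2, step.2.2.2.2)) : PvCub), (1 : Int))] else []) ++
    ((cubs.filter (fun e => pvIsintersect
        ((step.2.1.1, step.2.2.1.1, step.2.2.2.1), (step.2.1.2, step.2.2.1.2, step.2.2.2.2)) e.1)).map
      (fun e => (pvIntersection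
        ((step.2.1.1, step.2.2.1.1, step.2.2.2.1), (step.2.1.2, step.2.2.1.2, step.2.2.2.2)) e.1, -e.2))))

def pvFlat (steps : List (String × (Int × Int) × (Int × Int) × (Int × Int))) : List (PvCub × Int) :=
  steps.foldl pvStepF []

def pvStepBox (s : String × (Int × Int) × (Int × Int) × (Int × Int)) : PvCub :=
  ((s.2.1.1, s.2.2.1.1, s.2.2.2.1), (s.2.1.2, s.2.2.1.2, s.2.2.2.2))

def pvTot (E : List (PvCub × Int)) : Int := (E.map (fun e => pvVolB e.1 * e.2)).sum

def pvRest (E : List (PvCub × Int)) (R : PvCub) : Int :=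
  (E.map (fun e => if pvProperB (pvInterB e.1 R) then pvVolB (pvInterB e.1 R) * e.2 else 0)).sum

def pvCov : List (String × (Int × Int) × (Int × Int) × (Int × Int)) → PvCub → Int
  | [], _ => 0
  | s :: L, R =>
      (if s.1 == "on" ∧ pvProperB (pvInterB (pvStepBox s) R) = true
        then pvUnc (L.map pvStepBox) (pvInterB (pvStepBox s) R) else 0) + pvCov L R

-- max/min toolbox ------------------------------------------------------------

theorem pvProperB_iff (b : PvCub) :
    pvProperB b = true ↔ (b.1.1 ≤ b.2.1 ∧ b.1.2.1 ≤ b.2.2.1 ∧ b.1.2.2 ≤ b.2.2.2) := by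
  simp [pvProperB]

theorem pvIsintersect_iff (na c : PvCub) :
    pvIsintersect na c = true ↔
      (max na.1.1 c.1.1 ≤ min na.2.1 c.2.1 ∧ max na.1.2.1 c.1.2.1 ≤ min na.2.2.1 c.2.2.1 ∧
       max na.1.2.2 c.1.2.2 ≤ min na.2.2.2 c.2.2.2) := by
  simp only [pvIsintersect]
  split_ifs with h
  · simp only [false_iff]; omega
  · simp only [true_iff]; omega

theorem pvIsintersect_eq_proper (na c : PvCub) :
    pvIsintersect na c = pvProperB (pvInterB na c) := by
  have h1 := pvIsintersect_iff na c
  have h2 : pvProperB (pvInterB na c) = true ↔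
      (max na.1.1 c.1.1 ≤ min na.2.1 c.2.1 ∧ max na.1.2.1 c.1.2.1 ≤ min na.2.2.1 c.2.2.1 ∧
       max na.1.2.2 c.1.2.2 ≤ min na.2.2.2 c.2.2.2) := by
    rw [pvProperB_iff]; simp [pvInterB]
  by_cases h : pvIsintersect na c = true
  · rw [h, eq_comm, h2]; exact h1.mp h
  · have hf : pvIsintersect na c = false := by simpa using h
    rw [hf, eq_comm, ← Bool.not_eq_true, h2]
    intro hc; exact h (h1.mpr hc)

theorem pvInterB_comm (b c : PvCub) : pvInterB b c = pvInterB c b := by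
  simp only [pvInterB, Prod.mk.injEq]
  refine ⟨⟨?_, ?_, ?_⟩, ?_, ?_, ?_⟩ <;> omega

theorem pvInterB_right_comm (a b c : PvCub) :
    pvInterB (pvInterB a b) c = pvInterB (pvInterB a c) b := by
  simp only [pvInterB, Prod.mk.injEq]
  refine ⟨⟨?_, ?_, ?_⟩, ?_, ?_, ?_⟩ <;> omega

theorem pvInterB_assoc (a b c : PvCub) :
    pvInterB (pvInterB a b) c = pvInterB a (pvInterB b c) := by
  simp only [pvInterB, Prod.mk.injEq]
  refine ⟨⟨?_, ?_, ?_⟩, ?_, ?_, ?_⟩ <;> omega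

theorem pvProper_drop (a b : PvCub) (h : pvProperB (pvInterB a b) = true) :
    pvProperB a = true := by
  rw [pvProperB_iff] at h ⊢
  simp only [pvInterB] at h
  obtain ⟨h1, h2, h3⟩ := h
  refine ⟨?_, ?_, ?_⟩ <;> omega

-- the old A ↔ flat-list bridge ------------------------------------------------

-- signed multiplicity of cuboid c in the flat list
def pvSgn (L : List (PvCub × Int)) (c : PvCub) : Int :=
  (L.map (fun e => if e.1 = c then e.2 else 0)).sum

theorem pvSgn_nil (c : PvCub) : pvSgn [] c = 0 := rfl

theorem pvSgn_append (L M : List (PvCub × Int)) (c : PvCub) :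
    pvSgn (L ++ M) c = pvSgn L c + pvSgn M c := by
  simp [pvSgn]

theorem pvSgn_cons (e : PvCub × Int) (L : List (PvCub × Int)) (c : PvCub) :
    pvSgn (e :: L) c = (if e.1 = c then e.2 else 0) + pvSgn L c := by
  simp [pvSgn]

-- extracting the single nonzero term of a sum over a nodup key list
theorem pvSingle (K : List PvCub) (c : PvCub) (g : PvCub → Int)
    (hK : K.Nodup) (hc : c ∈ K) :
    (K.map (fun k => if c = k then g k else 0)).sum = g c := by
  induction K with
  | nil => cases hc
  | cons a K ih =>
    rcases List.nodup_cons.mp hK with ⟨ha, hK'⟩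
    by_cases hca : c = a
    · subst hca
      have : (K.map (fun k => if c = k then g k else 0)).sum = 0 := by
        apply List.sum_eq_zero
        intro x hx
        rcases List.mem_map.mp hx with ⟨k, hk, rfl⟩
        simp only [ite_eq_right_iff]
        intro h; subst h; exact absurd hk ha
      simp [this]
    · have hc' : c ∈ K := by
        rcases List.mem_cons.mp hc with h | h
        · exact absurd h hca
        · exact h
      simp [hca, ih hK' hc']

-- grouping a signed sum over the list by a nodup key list covering it
theorem pvGroup (f : PvCub → Int) (L : List (PvCub × Int)) (K : List PvCub)
    (hK : K.Nodup) (hsub : ∀ e ∈ L, e.1 ∈ K) :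
    (L.map (fun e => f e.1 * e.2)).sum = (K.map (fun k => f k * pvSgn L k)).sum := by
  induction L with
  | nil =>
    simp only [List.map_nil, List.sum_nil]
    symm
    apply List.sum_eq_zero
    intro x hx
    rcases List.mem_map.mp hx with ⟨k, _, rfl⟩
    simp [pvSgn_nil]
  | cons e L ih =>
    have hsub' : ∀ e' ∈ L, e'.1 ∈ K := fun e' h => hsub e' (List.mem_cons_of_mem _ h)
    have he : e.1 ∈ K := hsub e (List.mem_cons_self)
    have hrw : (K.map (fun k => f k * pvSgn (e :: L) k)).sum
        = (K.map (fun k => (if e.1 = k then f k * e.2 else 0) + f k * pvSgn L k)).sum := by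
      apply congrArg
      apply List.map_congr_left
      intro k _
      rw [pvSgn_cons]
      by_cases h : e.1 = k
      · simp [h]
        ring
      · simp [h]
    rw [hrw, PySem.List.sum_map_add_int, pvSingle K e.1 (fun k => f k * e.2) hK he, ← ih hsub']
    simp

-- closed form of pvGetArea
theorem pvGetArea_eq (c : PvCub) :
    pvGetArea c = (c.2.1 - c.1.1 + 1) * (c.2.2.1 - c.1.2.1 + 1) * (c.2.2.2 - c.1.2.2 + 1) := by
  simp [pvGetArea, List.range_succ, pvComp]

-- characterization of A's updated_areas fold: value at any key
theorem pvUGetD (na : PvCub) (l : List (PvCub × Int)) (u : PySem.Dict PvCub Int) (i : PvCub) :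
    (l.foldl (fun u p => if pvIsintersect na p.1 then
        u.modify (pvIntersection na p.1) 0 (fun x => x - p.2) else u) u).getD i 0
      = u.getD i 0 +
        (l.map (fun p => if pvIsintersect na p.1 = true ∧ pvIntersection na p.1 = i
          then -p.2 else 0)).sum := by
  induction l generalizing u with
  | nil => simp
  | cons p l ih =>
    simp only [List.foldl_cons, List.map_cons, List.sum_cons]
    by_cases h : pvIsintersect na p.1 = true
    · rw [if_pos h, ih, PySem.Dict.getD_modify]
      by_cases hi : i = pvIntersection na p.1
      · simp only [hi, if_true]
        simp [h, hi.symm]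
        ring
      · have hi' : ¬ (pvIntersection na p.1 = i) := fun hh => hi hh.symm
        simp [hi, hi', h]
    · rw [if_neg h, ih]
      simp [h]

-- characterization of A's updated_areas fold: key membership
theorem pvUContains (na : PvCub) (l : List (PvCub × Int)) (u : PySem.Dict PvCub Int) (i : PvCub) :
    ((l.foldl (fun u p => if pvIsintersect na p.1 then
        u.modify (pvIntersection na p.1) 0 (fun x => x - p.2) else u) u).contains i = true)
      ↔ (u.contains i = true ∨ ∃ p ∈ l, pvIsintersect na p.1 = true ∧ pvIntersection na p.1 = i) := by
  induction l generalizing u with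
  | nil => simp
  | cons p l ih =>
    simp only [List.foldl_cons]
    by_cases h : pvIsintersect na p.1 = true
    · rw [if_pos h, ih]
      rw [PySem.Dict.contains_modify]
      constructor
      · rintro (hc | hc)
        · rcases Bool.or_eq_true_iff.mp hc with hc | hc
          · exact Or.inr ⟨p, List.mem_cons_self, h, (eq_of_beq hc).symm⟩
          · exact Or.inl hc
        · rcases hc with ⟨q, hq, hq2⟩
          exact Or.inr ⟨q, List.mem_cons_of_mem _ hq, hq2⟩
      · rintro (hc | ⟨q, hq, hq1, hq2⟩)
        · exact Or.inl (Bool.or_eq_true_iff.mpr (Or.inr hc))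
        · rcases List.mem_cons.mp hq with rfl | hq'
          · exact Or.inl (Bool.or_eq_true_iff.mpr (Or.inl (by rw [hq2]; exact BEq.refl i)))
          · exact Or.inr ⟨q, hq', hq1, hq2⟩
    · rw [if_neg h, ih]
      constructor
      · rintro (hc | ⟨q, hq, hq2⟩)
        · exact Or.inl hc
        · exact Or.inr ⟨q, List.mem_cons_of_mem _ hq, hq2⟩
      · rintro (hc | ⟨q, hq, hq1, hq2⟩)
        · exact Or.inl hc
        · rcases List.mem_cons.mp hq with rfl | hq'
          · exact absurd hq1 h
          · exact Or.inr ⟨q, hq', hq1, hq2⟩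

-- nodup keys through A's updated_areas fold
theorem pvUNodup (na : PvCub) (l : List (PvCub × Int)) (u : PySem.Dict PvCub Int)
    (h : u.keys.Nodup) :
    (l.foldl (fun u p => if pvIsintersect na p.1 then
        u.modify (pvIntersection na p.1) 0 (fun x => x - p.2) else u) u).keys.Nodup := by
  induction l generalizing u with
  | nil => exact h
  | cons p l ih =>
    simp only [List.foldl_cons]
    by_cases hc : pvIsintersect na p.1 = true
    · rw [if_pos hc]
      apply ih
      have := PySem.Dict.keys_modify u (pvIntersection na p.1) 0 (fun x => x - p.2)
      rw [List.Nodup, this]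
      exact PySem.Dict.nodup_keys_insert _ _ _ h
    · rw [if_neg hc]; exact ih u h

-- single merge step of A's merge-back loop
theorem pvMergeStep (u ar : PySem.Dict PvCub Int) (k c : PvCub) :
    ((if ar.contains k then ar.insert k (ar.getD k 0 + u.getD k 0)
      else ar.insert k (u.getD k 0)).getD c 0)
    = if c = k then ar.getD k 0 + u.getD k 0 else ar.getD c 0 := by
  by_cases h : ar.contains k = true
  · rw [if_pos h, PySem.Dict.getD_insert]
  · rw [if_neg h, PySem.Dict.getD_insert]
    have hf : ar.contains k = false := by
      cases hcb : ar.contains k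
      · rfl
      · exact absurd hcb h
    have h0 : ar.getD k 0 = 0 := PySem.Dict.getD_of_not_contains ar 0 hf
    by_cases hck : c = k <;> simp [hck, h0]

-- A's merge-back loop: value at any key
theorem pvMergeGetD (u : PySem.Dict PvCub Int) (K : List PvCub) (hK : K.Nodup)
    (ar : PySem.Dict PvCub Int) (c : PvCub) :
    (K.foldl (fun ar key =>
      if ar.contains key then ar.insert key (ar.getD key 0 + u.getD key 0)
      else ar.insert key (u.getD key 0)) ar).getD c 0
    = ar.getD c 0 + (if c ∈ K then u.getD c 0 else 0) := by
  induction K generalizing ar with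
  | nil => simp
  | cons k K ih =>
    rcases List.nodup_cons.mp hK with ⟨hk, hK'⟩
    simp only [List.foldl_cons]
    rw [ih hK']
    rw [pvMergeStep]
    by_cases hck : c = k
    · subst hck
      have : c ∉ K := hk
      simp [this]
    · by_cases hcK : c ∈ K <;> simp [hck, hcK]

-- A's merge-back loop: key membership
theorem pvMergeContains (u : PySem.Dict PvCub Int) (K : List PvCub)
    (ar : PySem.Dict PvCub Int) (c : PvCub) :
    ((K.foldl (fun ar key =>
      if ar.contains key then ar.insert key (ar.getD key 0 + u.getD key 0)
      else ar.insert key (u.getD key 0)) ar).contains c = true)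
    ↔ (ar.contains c = true ∨ c ∈ K) := by
  induction K generalizing ar with
  | nil => simp
  | cons k K ih =>
    simp only [List.foldl_cons]
    have harw : ∀ (ar' : PySem.Dict PvCub Int),
        ((if ar'.contains k then ar'.insert k (ar'.getD k 0 + u.getD k 0)
          else ar'.insert k (u.getD k 0)).contains c = true) ↔ (c = k ∨ ar'.contains c = true) := by
      intro ar'
      by_cases h : ar'.contains k = true <;>
        simp [h, PySem.Dict.contains_insert]
    rw [ih, harw]
    constructor
    · rintro ((rfl | h) | h)
      · exact Or.inr (List.mem_cons_self)
      · exact Or.inl h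
      · exact Or.inr (List.mem_cons_of_mem _ h)
    · rintro (h | h)
      · exact Or.inl (Or.inr h)
      · rcases List.mem_cons.mp h with rfl | h'
        · exact Or.inl (Or.inl rfl)
        · exact Or.inr h'

-- A's merge-back loop: nodup keys
theorem pvMergeNodup (u : PySem.Dict PvCub Int) (K : List PvCub)
    (ar : PySem.Dict PvCub Int) (h : ar.keys.Nodup) :
    (K.foldl (fun ar key =>
      if ar.contains key then ar.insert key (ar.getD key 0 + u.getD key 0)
      else ar.insert key (u.getD key 0)) ar).keys.Nodup := by
  induction K generalizing ar with
  | nil => exact h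
  | cons k K ih =>
    simp only [List.foldl_cons]
    apply ih
    by_cases hc : ar.contains k = true
    · rw [if_pos hc]; exact PySem.Dict.nodup_keys_insert _ _ _ h
    · rw [if_neg hc]; exact PySem.Dict.nodup_keys_insert _ _ _ h

-- the invariant tying A's dict to the flat signed list
def pvInv (d : PySem.Dict PvCub Int) (L : List (PvCub × Int)) : Prop :=
  d.keys.Nodup ∧ (∀ c, d.getD c 0 = pvSgn L c) ∧ (∀ e ∈ L, d.contains e.1 = true)

theorem pvSgn_filter_map (na : PvCub) (L : List (PvCub × Int)) (c : PvCub) :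
    pvSgn ((L.filter (fun e => pvIsintersect na e.1)).map
        (fun e => (pvIntersection na e.1, -e.2))) c
      = (L.map (fun p => if pvIsintersect na p.1 = true ∧ pvIntersection na p.1 = c
          then -p.2 else 0)).sum := by
  induction L with
  | nil => simp [pvSgn_nil]
  | cons e L ih =>
    by_cases h : pvIsintersect na e.1 = true
    · simp only [List.filter_cons, h, if_pos, List.map_cons, List.sum_cons, pvSgn_cons]
      rw [ih]
      by_cases hi : pvIntersection na e.1 = c <;> simp [hi]
    · simp only [List.filter_cons, List.map_cons, List.sum_cons]
      rw [if_neg (by simp [h]), ih]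
      simp [h]

-- one step preserves the invariant
theorem pvStepInv (d : PySem.Dict PvCub Int) (L : List (PvCub × Int))
    (step : String × (Int × Int) × (Int × Int) × (Int × Int)) (h : pvInv d L) :
    pvInv (pvStepA d step) (pvStepF L step) := by
  obtain ⟨hnd, hval, hmem⟩ := h
  unfold pvStepF
  unfold pvStepA
  set na : PvCub := ((step.2.1.1, step.2.2.1.1, step.2.2.2.1),
    (step.2.1.2, step.2.2.1.2, step.2.2.2.2)) with hna
  set u0 : PySem.Dict PvCub Int :=
    (if step.1 == "on" then PySem.Dict.empty.modify na 0 (· + 1) else PySem.Dict.empty) with hu0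
  set u := d.items.foldl (fun u p =>
    if pvIsintersect na p.1 then
      u.modify (pvIntersection na p.1) 0 (fun x => x - p.2) else u) u0 with hu
  set buf0 : List (PvCub × Int) := (if step.1 == "on" then [((na, (1:Int)))] else []) with hbuf0
  set M := (L.filter (fun e => pvIsintersect na e.1)).map
      (fun e => (pvIntersection na e.1, -e.2)) with hM
  have hu0nd : u0.keys.Nodup := by
    rw [hu0]
    by_cases hf : step.1 == "on"
    · rw [if_pos hf, List.Nodup, PySem.Dict.keys_modify]
      exact PySem.Dict.nodup_keys_insert _ _ _ PySem.Dict.nodup_keys_empty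
    · rw [if_neg hf]; exact PySem.Dict.nodup_keys_empty
  have hund : u.keys.Nodup := pvUNodup na d.items u0 hu0nd
  -- value of u at any key = signed multiplicity of buf0 ++ M there
  have hu0val : ∀ c, u0.getD c 0 = pvSgn buf0 c := by
    intro c
    rw [hu0, hbuf0]
    by_cases hf : step.1 == "on"
    · rw [if_pos hf, if_pos hf, PySem.Dict.getD_modify]
      by_cases hc : c = na
      · simp [hc, pvSgn_cons, pvSgn_nil]
      · have : ¬ (na = c) := fun hh => hc hh.symm
        simp [hc, this, pvSgn_cons, pvSgn_nil]
    · rw [if_neg hf, if_neg hf]; simp [pvSgn_nil]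
  have hsum : ∀ c, (d.items.map (fun p =>
      if pvIsintersect na p.1 = true ∧ pvIntersection na p.1 = c then -p.2 else 0)).sum
      = (L.map (fun p =>
      if pvIsintersect na p.1 = true ∧ pvIntersection na p.1 = c then -p.2 else 0)).sum := by
    intro c
    have hgf : ∀ (l : List (PvCub × Int)), (l.map (fun p =>
        if pvIsintersect na p.1 = true ∧ pvIntersection na p.1 = c then -p.2 else 0))
        = (l.map (fun p =>
        (if pvIsintersect na p.1 = true ∧ pvIntersection na p.1 = c then (-1 : Int) else 0) * p.2)) := by
      intro l
      apply List.map_congr_left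
      intro p _
      by_cases hp : pvIsintersect na p.1 = true ∧ pvIntersection na p.1 = c <;> simp [hp]
    rw [hgf, hgf]
    rw [PySem.Dict.items_eq_map_keys d hnd 0, List.map_map]
    have hGroup := pvGroup (fun k =>
        if pvIsintersect na k = true ∧ pvIntersection na k = c then (-1 : Int) else 0) L d.keys hnd
        (fun e he => (PySem.Dict.contains_iff_mem_keys d e.1).mp (hmem e he))
    rw [hGroup]
    apply congrArg
    apply List.map_congr_left
    intro k _
    simp only [Function.comp]
    rw [hval k]
  have huval : ∀ c, u.getD c 0 = pvSgn (buf0 ++ M) c := by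
    intro c
    rw [hu, pvUGetD, hu0val, pvSgn_append, hM, pvSgn_filter_map, hsum]
  refine ⟨pvMergeNodup u u.keys _ hnd, ?_, ?_⟩
  · intro c
    rw [pvMergeGetD u u.keys hund d c]
    have hext : (if c ∈ u.keys then u.getD c 0 else 0) = u.getD c 0 := by
      by_cases hc : c ∈ u.keys
      · rw [if_pos hc]
      · rw [if_neg hc, PySem.Dict.getD_of_not_contains u 0]
        rw [← Bool.not_eq_true]
        exact fun hh => hc ((PySem.Dict.contains_iff_mem_keys u c).mp hh)
    rw [hext, huval, hval c, pvSgn_append, ← List.append_assoc, pvSgn_append]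
    ring_nf
    rw [pvSgn_append]
    ring
  · intro e he
    rw [pvMergeContains]
    rcases List.mem_append.mp he with he | he
    · exact Or.inl (hmem e he)
    · right
      rw [← PySem.Dict.contains_iff_mem_keys]
      apply (pvUContains na d.items u0 e.1).mpr
      rcases List.mem_append.mp he with he | he
      · -- e ∈ buf0 : only when flag is on, e = (na, 1); u0 contains na
        left
        rw [hu0, hbuf0] at *
        by_cases hf : step.1 == "on"
        · rw [if_pos hf] at he ⊢
          rcases List.mem_singleton.mp he with rfl
          rw [PySem.Dict.contains_modify]
          simp
        · rw [if_neg hf] at he; cases he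
      · -- e ∈ M : intersection of na with some q ∈ L; (q.1, v) ∈ d.items
        right
        rw [hM] at he
        rcases List.mem_map.mp he with ⟨q, hq, rfl⟩
        rcases List.mem_filter.mp hq with ⟨hqL, hqI⟩
        have hcq : d.contains q.1 = true := hmem q hqL
        rw [PySem.Dict.contains_eq_isSome_get?] at hcq
        rcases Option.isSome_iff_exists.mp hcq with ⟨v, hv⟩
        exact ⟨(q.1, v), PySem.Dict.mem_items_of_get?_eq_some d hv, hqI, rfl⟩

theorem pvFoldInv (steps : List (String × (Int × Int) × (Int × Int) × (Int × Int)))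
    (d : PySem.Dict PvCub Int) (L : List (PvCub × Int)) (h : pvInv d L) :
    pvInv (steps.foldl pvStepA d) (steps.foldl pvStepF L) := by
  induction steps generalizing d L with
  | nil => exact h
  | cons s steps ih =>
    simp only [List.foldl_cons]
    exact ih _ _ (pvStepInv d L s h)

-- final sums agree under the invariant
theorem pvFinalSum (d : PySem.Dict PvCub Int) (L : List (PvCub × Int)) (h : pvInv d L) :
    (d.items.map (fun p => pvGetArea p.1 * p.2)).sum
      = (L.map (fun e => pvGetArea e.1 * e.2)).sum := by
  obtain ⟨hnd, hval, hmem⟩ := h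
  rw [PySem.Dict.items_eq_map_keys d hnd 0, List.map_map]
  rw [pvGroup pvGetArea L d.keys hnd
    (fun e he => (PySem.Dict.contains_iff_mem_keys d e.1).mp (hmem e he))]
  apply congrArg
  apply List.map_congr_left
  intro k _
  simp only [Function.comp]
  rw [hval k]

theorem part2_eq_flat (steps : List (String × (Int × Int) × (Int × Int) × (Int × Int))) :
    part2 steps = pvTot (pvFlat steps) := by
  unfold part2 pvTot pvFlat
  have hinv : pvInv (steps.foldl pvStepA PySem.Dict.empty) (steps.foldl pvStepF []) := by
    apply pvFoldInv
    refine ⟨PySem.Dict.nodup_keys_empty, ?_, ?_⟩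
    · intro c; simp [pvSgn_nil, PySem.Dict.getD_empty]
    · intro e he; cases he
  rw [pvFinalSum _ _ hinv]
  apply congrArg
  apply List.map_congr_left
  intro e _
  rw [pvGetArea_eq]
  simp [pvVolB]

-- the flat list ↔ reverse recursion layer -------------------------------------

theorem pvUnc_append (M : List PvCub) (c : PvCub) :
    ∀ b, pvUnc (M ++ [c]) b =
      if pvProperB (pvInterB b c) then pvUnc M b - pvUnc M (pvInterB b c) else pvUnc M b := by
  induction M with
  | nil =>
    intro b
    simp [pvUnc]
  | cons d M ih =>
    intro b
    have e1 : pvInterB (pvInterB b d) c = pvInterB (pvInterB b c) d := pvInterB_right_comm b d c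
    have f1 : pvProperB (pvInterB (pvInterB b c) d) = true → pvProperB (pvInterB b c) = true :=
      pvProper_drop _ _
    have f2 : pvProperB (pvInterB (pvInterB b c) d) = true → pvProperB (pvInterB b d) = true := by
      intro h
      rw [← e1] at h
      exact pvProper_drop _ _ h
    simp only [List.cons_append, pvUnc, ih]
    rw [e1]
    split_ifs <;> (try ring) <;> simp_all

theorem pvIntersection_eq_interB (na c : PvCub) : pvIntersection na c = pvInterB na c := rfl

theorem pvBoxB_eq (s : String × (Int × Int) × (Int × Int) × (Int × Int)) :
    pvBoxB s = (pvStepBox s, s.1 == "on") := rfl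

theorem pvMapFst (M : List (String × (Int × Int) × (Int × Int) × (Int × Int))) :
    (M.map pvBoxB).map Prod.fst = M.map pvStepBox := by
  rw [List.map_map]; rfl

theorem pvFlat_append (L : List (String × (Int × Int) × (Int × Int) × (Int × Int)))
    (s : String × (Int × Int) × (Int × Int) × (Int × Int)) :
    pvFlat (L ++ [s]) = pvStepF (pvFlat L) s := by
  simp [pvFlat, List.foldl_append]

theorem pvRest_cons (x : PvCub × Int) (X : List (PvCub × Int)) (R : PvCub) :
    pvRest (x :: X) R =
      (if pvProperB (pvInterB x.1 R) then pvVolB (pvInterB x.1 R) * x.2 else 0) + pvRest X R := by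
  simp [pvRest]

theorem pvRest_append (X Y : List (PvCub × Int)) (R : PvCub) :
    pvRest (X ++ Y) R = pvRest X R + pvRest Y R := by
  simp [pvRest]

theorem pvTot_cons (x : PvCub × Int) (X : List (PvCub × Int)) :
    pvTot (x :: X) = pvVolB x.1 * x.2 + pvTot X := by
  simp [pvTot]

theorem pvTot_append (X Y : List (PvCub × Int)) :
    pvTot (X ++ Y) = pvTot X + pvTot Y := by
  simp [pvTot]

theorem pvRest_gen (na : PvCub) (E : List (PvCub × Int)) (R : PvCub) :
    pvRest ((E.filter (fun e => pvIsintersect na e.1)).map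
        (fun e => (pvIntersection na e.1, -e.2))) R
      = - pvRest E (pvInterB na R) := by
  induction E with
  | nil => simp [pvRest]
  | cons e E ih =>
    have e2 : pvInterB (pvInterB na e.1) R = pvInterB e.1 (pvInterB na R) := by
      rw [pvInterB_comm na e.1, pvInterB_assoc]
    by_cases h : pvIsintersect na e.1 = true
    · simp only [List.filter_cons, h, if_pos, List.map_cons]
      rw [pvRest_cons, pvRest_cons, ih]
      simp only [pvIntersection_eq_interB]
      rw [e2]
      split_ifs <;> ring
    · have hf : pvIsintersect na e.1 = false := by simpa using h
      simp only [List.filter_cons, hf, Bool.false_eq_true, if_false]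
      rw [ih, pvRest_cons]
      have hz : pvProperB (pvInterB e.1 (pvInterB na R)) = false := by
        rw [← e2]
        have hne : pvProperB (pvInterB na e.1) = false := by
          rw [← pvIsintersect_eq_proper]; exact hf
        cases hx : pvProperB (pvInterB (pvInterB na e.1) R) with
        | false => rfl
        | true => exact absurd (pvProper_drop _ _ hx) (by simp [hne])
      rw [hz]
      simp

theorem pvTot_gen (na : PvCub) (E : List (PvCub × Int)) :
    pvTot ((E.filter (fun e => pvIsintersect na e.1)).map
        (fun e => (pvIntersection na e.1, -e.2)))
      = - pvRest E na := by
  induction E with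
  | nil => simp [pvTot, pvRest]
  | cons e E ih =>
    have e2 : pvInterB e.1 na = pvInterB na e.1 := pvInterB_comm _ _
    by_cases h : pvIsintersect na e.1 = true
    · simp only [List.filter_cons, h, if_pos, List.map_cons]
      rw [pvTot_cons, pvRest_cons, ih]
      simp only [pvIntersection_eq_interB, e2]
      rw [if_pos (by rw [← pvIsintersect_eq_proper]; exact h)]
      ring
    · have hf : pvIsintersect na e.1 = false := by simpa using h
      simp only [List.filter_cons, hf, Bool.false_eq_true, if_false]
      rw [ih, pvRest_cons]
      rw [if_neg (by rw [e2, ← pvIsintersect_eq_proper, hf]; simp)]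
      ring

theorem pvCov_append (L : List (String × (Int × Int) × (Int × Int) × (Int × Int)))
    (s : String × (Int × Int) × (Int × Int) × (Int × Int)) :
    ∀ R, pvCov (L ++ [s]) R =
      pvCov L R
      + (if s.1 == "on" ∧ pvProperB (pvInterB (pvStepBox s) R) = true
          then pvVolB (pvInterB (pvStepBox s) R) else 0)
      - pvCov L (pvInterB (pvStepBox s) R) := by
  induction L with
  | nil =>
    intro R
    simp [pvCov, pvUnc]
  | cons c L ih =>
    intro R
    have e3 : pvInterB (pvInterB (pvStepBox c) R) (pvStepBox s)
        = pvInterB (pvStepBox c) (pvInterB (pvStepBox s) R) := by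
      rw [pvInterB_assoc, pvInterB_comm R (pvStepBox s)]
    have f3 : pvProperB (pvInterB (pvStepBox c) (pvInterB (pvStepBox s) R)) = true →
        pvProperB (pvInterB (pvStepBox c) R) = true := by
      intro h
      rw [← e3] at h
      exact pvProper_drop _ _ h
    simp only [List.cons_append, pvCov]
    rw [show (L ++ [s]).map pvStepBox = L.map pvStepBox ++ [pvStepBox s] from by simp,
      pvUnc_append, ih R, e3]
    split_ifs <;> (try ring) <;> simp_all

theorem pvRest_stepF (E : List (PvCub × Int))
    (s : String × (Int × Int) × (Int × Int) × (Int × Int)) (R : PvCub) :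
    pvRest (pvStepF E s) R =
      pvRest E R
      + (if s.1 == "on" ∧ pvProperB (pvInterB (pvStepBox s) R) = true
          then pvVolB (pvInterB (pvStepBox s) R) else 0)
      - pvRest E (pvInterB (pvStepBox s) R) := by
  have hbox : pvStepBox s = ((s.2.1.1, s.2.2.1.1, s.2.2.2.1),
      (s.2.1.2, s.2.2.1.2, s.2.2.2.2)) := rfl
  rw [hbox]
  unfold pvStepF
  rw [pvRest_append, pvRest_append, pvRest_gen]
  have hbuf : pvRest (if s.1 == "on"
      then [((((s.2.1.1, s.2.2.1.1, s.2.2.2.1),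
               (s.2.1.2, s.2.2.1.2, s.2.2.2.2)) : PvCub), (1 : Int))] else []) R
      = (if s.1 == "on" ∧ pvProperB (pvInterB (((s.2.1.1, s.2.2.1.1, s.2.2.2.1),
          (s.2.1.2, s.2.2.1.2, s.2.2.2.2)) : PvCub) R) = true
          then pvVolB (pvInterB (((s.2.1.1, s.2.2.1.1, s.2.2.2.1),
          (s.2.1.2, s.2.2.1.2, s.2.2.2.2)) : PvCub) R) else 0) := by
    by_cases hon : s.1 == "on"
    · rw [if_pos hon]
      rw [pvRest_cons]
      by_cases hp : pvProperB (pvInterB (((s.2.1.1, s.2.2.1.1, s.2.2.2.1),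
          (s.2.1.2, s.2.2.1.2, s.2.2.2.2)) : PvCub) R) = true
      · rw [if_pos hp, if_pos ⟨hon, hp⟩]
        simp [pvRest]
      · rw [if_neg hp, if_neg (by rintro ⟨_, hq⟩; exact hp hq)]
        simp [pvRest]
    · rw [if_neg hon, if_neg (by rintro ⟨hq, _⟩; exact hon hq)]
      simp [pvRest]
  rw [hbuf]
  ring

theorem pvTot_stepF (E : List (PvCub × Int))
    (s : String × (Int × Int) × (Int × Int) × (Int × Int)) :
    pvTot (pvStepF E s) =
      pvTot E + (if s.1 == "on" then pvVolB (pvStepBox s) else 0) - pvRest E (pvStepBox s) := by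
  have hbox : pvStepBox s = ((s.2.1.1, s.2.2.1.1, s.2.2.2.1),
      (s.2.1.2, s.2.2.1.2, s.2.2.2.2)) := rfl
  rw [hbox]
  unfold pvStepF
  rw [pvTot_append, pvTot_append, pvTot_gen]
  have hbuf : pvTot (if s.1 == "on"
      then [((((s.2.1.1, s.2.2.1.1, s.2.2.2.1),
               (s.2.1.2, s.2.2.1.2, s.2.2.2.2)) : PvCub), (1 : Int))] else [])
      = (if s.1 == "on" then pvVolB (((s.2.1.1, s.2.2.1.1, s.2.2.2.1),
          (s.2.1.2, s.2.2.1.2, s.2.2.2.2)) : PvCub) else 0) := by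
    by_cases hon : s.1 == "on"
    · rw [if_pos hon, if_pos hon]
      simp [pvTot]
    · rw [if_neg hon, if_neg hon]
      simp [pvTot]
  rw [hbuf]
  ring

theorem pvRest_eq_pvCov (L : List (String × (Int × Int) × (Int × Int) × (Int × Int))) :
    ∀ R, pvRest (pvFlat L) R = pvCov L R := by
  induction L using List.reverseRecOn with
  | nil =>
    intro R
    simp [pvFlat, pvRest, pvCov]
  | append_singleton L s ih =>
    intro R
    rw [pvFlat_append, pvRest_stepF, ih R, ih (pvInterB (pvStepBox s) R), pvCov_append]

theorem pvTotalB_append (L : List (String × (Int × Int) × (Int × Int) × (Int × Int)))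
    (s : String × (Int × Int) × (Int × Int) × (Int × Int)) :
    pvTotalB ((L ++ [s]).map pvBoxB) =
      pvTotalB (L.map pvBoxB) + (if s.1 == "on" then pvVolB (pvStepBox s) else 0)
      - pvCov L (pvStepBox s) := by
  induction L with
  | nil =>
    simp [pvTotalB, pvBoxB_eq, pvUnc, pvCov]
  | cons c L ih =>
    simp only [List.cons_append, List.map_cons, pvBoxB_eq, pvTotalB, pvCov]
    rw [pvMapFst, pvMapFst,
      show (L ++ [s]).map pvStepBox = L.map pvStepBox ++ [pvStepBox s] from by simp,
      pvUnc_append, ih]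
    split_ifs <;> (try ring) <;> simp_all

theorem pvFlat_eq_alt (L : List (String × (Int × Int) × (Int × Int) × (Int × Int))) :
    pvTot (pvFlat L) = pvTotalB (L.map pvBoxB) := by
  induction L using List.reverseRecOn with
  | nil => simp [pvFlat, pvTot, pvTotalB]
  | append_singleton L s ih =>
    rw [pvFlat_append, pvTot_stepF, ih, pvRest_eq_pvCov, pvTotalB_append]

-- ===== VERDICT (by name: the statement is the Claim_ definition above) =====
theorem part2_spec : Claim_equal_part2 := by
  intro steps _
  unfold Spec_part2 part2_alt
  rw [part2_eq_flat, pvFlat_eq_alt]
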